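-- pv_equiv track=rewrite | github.com/aviswerdlow/k4 | archive/07_TOOLS/fork_f/f3_propagate.py | score_plaintext
-- ===== SOURCE A (Python) =====
-- from typing import List, Tuple, Dict, Optional, Set
--
-- def score_plaintext(text: str) -> Tuple[int, List[str]]:
--     """Score plaintext quality."""
--     score = 0
--     words_found = []
--
--     # Common words
--     common_words = {
--         'THE': 5, 'AND': 4, 'ARE': 3, 'YOU': 3, 'WAS': 4,
--         'HIS': 3, 'HER': 3, 'THAT': 4, 'HAVE': 4, 'FROM': 4,
--         'THEY': 4, 'WILL': 4, 'WOULD': 5, 'THERE': 5, 'THEIR': 5,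
--         'HEAT': 10, 'COLD': 8, 'WARM': 6, 'TIME': 5, 'CLOCK': 8,
--         'EAST': 8, 'WEST': 8, 'NORTH': 8, 'SOUTH': 8
--     }
--
--     for word, points in common_words.items():
--         if word in text:
--             score += points
--             words_found.append(word)
--
--     # Penalize high consonant runs
--     consonants = 0
--     for c in text:
--         if c not in 'AEIOU':
--             consonants += 1
--             if consonants > 5:
--                 score -= 2
--         else:
--             consonants = 0
--
--     return score, words_found
-- ===== SOURCE B (Python) =====
-- def score_plaintext(text: str):
--     """Score plaintext quality."""
--     table = [
--         ('THE', 5), ('AND', 4), ('ARE', 3), ('YOU', 3), ('WAS', 4),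
--         ('HIS', 3), ('HER', 3), ('THAT', 4), ('HAVE', 4), ('FROM', 4),
--         ('THEY', 4), ('WILL', 4), ('WOULD', 5), ('THERE', 5), ('THEIR', 5),
--         ('HEAT', 10), ('COLD', 8), ('WARM', 6), ('TIME', 5), ('CLOCK', 8),
--         ('EAST', 8), ('WEST', 8), ('NORTH', 8), ('SOUTH', 8)]
--     hits = [(w, p) for w, p in table if w in text]
--     words_found = [w for w, _ in hits]
--     score = sum(p for _, p in hits)
--     # Penalty by a sliding-window test: position i is "bad" iff the 6-character
--     # window text[i-5:i+1] contains no vowel; each bad position costs 2.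
--     # (A run of consonants of length L contributes exactly max(0, L-5) bad positions.)
--     bad = sum(1 for i in range(len(text))
--               if i >= 5 and not any(c in 'AEIOU' for c in text[i - 5:i + 1]))
--     return score - 2 * bad, words_found
-- ===== Notes on version B (the rewrite author's own statement) =====
-- stated objective: alternative
-- what changed: The keyword loop becomes a single filter of the table with projections for words and score, and A's stateful consonant-run counter is replaced by a stateless sliding-window count: position i incurs the -2 penalty iff the 6-character window text[i-5:i+1] contains no vowel, so the penalty is 2 * (number of vowel-free 6-windows), with no run/counter bookkeeping at all.
import Mathlib
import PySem

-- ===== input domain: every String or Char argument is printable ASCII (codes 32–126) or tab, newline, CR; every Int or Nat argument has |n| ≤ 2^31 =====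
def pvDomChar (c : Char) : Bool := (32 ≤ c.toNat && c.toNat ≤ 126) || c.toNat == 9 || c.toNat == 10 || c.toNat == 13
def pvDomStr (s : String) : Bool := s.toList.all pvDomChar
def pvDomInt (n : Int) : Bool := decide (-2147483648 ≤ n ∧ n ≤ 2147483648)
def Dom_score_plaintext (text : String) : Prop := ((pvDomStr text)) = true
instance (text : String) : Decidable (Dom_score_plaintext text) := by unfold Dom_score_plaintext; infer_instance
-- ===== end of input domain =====

-- B replaces A's stateful consonant-run counter by a stateless sliding-window count
-- (position i costs 2 iff the 6-char window text[i-5:i+1] has no vowel) and A's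
-- score/words accumulator loop by one filter of the table with two projections;
-- objective: alternative (same cost).

-- the common_words table (shared data literal of both ports; in A it is a dict, in B a pair list)
def pvWords : List (String × Int) :=
  [("THE", 5), ("AND", 4), ("ARE", 3), ("YOU", 3), ("WAS", 4),
   ("HIS", 3), ("HER", 3), ("THAT", 4), ("HAVE", 4), ("FROM", 4),
   ("THEY", 4), ("WILL", 4), ("WOULD", 5), ("THERE", 5), ("THEIR", 5),
   ("HEAT", 10), ("COLD", 8), ("WARM", 6), ("TIME", 5), ("CLOCK", 8),
   ("EAST", 8), ("WEST", 8), ("NORTH", 8), ("SOUTH", 8)]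

-- `c in 'AEIOU'` for a single character c (exact: one-char substring test = membership)
def pvVowel (c : Char) : Bool := c ∈ ['A', 'E', 'I', 'O', 'U']

-- ===== PORT A =====
-- loop body of `for c in text: if c not in 'AEIOU': consonants += 1; if consonants > 5: score -= 2; else: consonants = 0`
def pvConsStep (st : Int × Nat) (c : Char) : Int × Nat :=
  if !pvVowel c then
    (if st.2 + 1 > 5 then st.1 - 2 else st.1, st.2 + 1)
  else (st.1, 0)

def score_plaintext (text : String) : Int × List String :=
  -- for word, points in common_words.items(): if word in text: score += points; words_found.append(word)
  let kw : Int × List String :=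
    pvWords.foldl (fun st wp =>
      if PySem.Str.isIn wp.1 text then (st.1 + wp.2, st.2 ++ [wp.1]) else st) (0, [])
  -- consonant-run counter loop over the characters
  let fin : Int × Nat := text.toList.foldl pvConsStep (kw.1, 0)
  (fin.1, kw.2)

-- ===== PORT B =====
-- B's window test `i >= 5 and not any(c in 'AEIOU' for c in text[i-5:i+1])`:
-- the slice text[i-5:i+1] is (drop (i-5)).take 6 when 5 ≤ i (slice_natCast; for i < 5
-- the left conjunct is already false, matching Python's short-circuit `and`).
def pvBad (cs : List Char) (i : Nat) : Bool :=
  decide (5 ≤ i) && ((cs.drop (i - 5)).take 6).all (fun c => !pvVowel c)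

def score_plaintext_alt (text : String) : Int × List String :=
  -- hits = [(w, p) for w, p in table if w in text]
  let hits := pvWords.filter (fun wp => PySem.Str.isIn wp.1 text)
  -- bad = sum(1 for i in range(len(text)) if i >= 5 and not any(...))
  let bad : Int := (List.range text.toList.length).foldl
    (fun acc i => if pvBad text.toList i then acc + 1 else acc) 0
  ((hits.map Prod.snd).sum - 2 * bad, hits.map Prod.fst)

-- ===== PRECONDITION & SPEC =====
def Spec_score_plaintext (text : String) (out : Int × List String) : Prop := out = score_plaintext_alt text
instance (text : String) (out : Int × List String) : Decidable (Spec_score_plaintext text out) := by unfold Spec_score_plaintext; infer_instance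

-- ===== CLAIM (what is proved, stated in full; the proofs are below) =====
def Claim_equal_score_plaintext : Prop := ∀ (text : String), Dom_score_plaintext text → Spec_score_plaintext text (score_plaintext text)

-- ===== LEMMAS AND PROOFS =====

-- keyword loop of A = filter + two projections of B
theorem pv_kw_foldl (l : List (String × Int)) (p : String × Int → Bool) (s : Int) (ws : List String) :
    l.foldl (fun st wp => if p wp then (st.1 + wp.2, st.2 ++ [wp.1]) else st) (s, ws)
      = (s + ((l.filter p).map Prod.snd).sum, ws ++ (l.filter p).map Prod.fst) := by
  induction l generalizing s ws with
  | nil => simp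
  | cons hd tl ih =>
    by_cases h : p hd
    · simp [h, ih]; ring
    · simp [h, ih]

-- hit count of A's counter loop, as a recursion (proof-only helper)
def pvPenA : List Char → Nat → Int
  | [], _ => 0
  | c :: cs, k => if pvVowel c then pvPenA cs 0 else (if k + 1 > 5 then 1 else 0) + pvPenA cs (k + 1)

theorem pv_fold_penA (cs : List Char) (s : Int) (k : Nat) :
    (cs.foldl pvConsStep (s, k)).1 = s - 2 * pvPenA cs k := by
  induction cs generalizing s k with
  | nil => simp [pvPenA]
  | cons c cs ih =>
    rw [List.foldl_cons]
    by_cases hv : pvVowel c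
    · have hstep : pvConsStep (s, k) c = (s, 0) := by simp [pvConsStep, hv]
      rw [hstep, ih]; simp [pvPenA, hv]
    · by_cases hk : k + 1 > 5
      · have hstep : pvConsStep (s, k) c = (s - 2, k + 1) := by simp [pvConsStep, hv, hk]
        rw [hstep, ih]; simp [pvPenA, hv, hk]; ring
      · have hstep : pvConsStep (s, k) c = (s, k + 1) := by simp [pvConsStep, hv, hk]
        rw [hstep, ih]; simp [pvPenA, hv, hk]

-- "A's counter is > 5 after char i" as a window predicate, with k virtual consonants
-- preceding the list (proof-only helper)
def pvCond (cs : List Char) (k : Nat) (i : Nat) : Bool :=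
  ((cs.take (i + 1)).drop (i - 5)).all (fun c => !pvVowel c) && (decide (5 ≤ i) || decide (5 < k + i + 1))

theorem pv_cond_succ (cs : List Char) (c : Char) (k i : Nat) :
    pvCond (c :: cs) k (i + 1) = pvCond cs (if pvVowel c then 0 else k + 1) i := by
  unfold pvCond
  rw [List.take_succ_cons]
  by_cases h5 : 5 ≤ i
  · have h1 : i + 1 - 5 = (i - 5) + 1 := by omega
    rw [h1, List.drop_succ_cons]
    simp [h5, Nat.le_succ_of_le h5]
  · have h1 : i + 1 - 5 = 0 := by omega
    have h2 : i - 5 = 0 := by omega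
    rw [h1, h2, List.drop_zero, List.drop_zero, List.all_cons]
    cases hv : pvVowel c
    · apply Bool.eq_iff_iff.mpr
      simp [h5]
      omega
    · apply Bool.eq_iff_iff.mpr
      simp [h5]

theorem pv_penA_count (cs : List Char) (k : Nat) :
    pvPenA cs k = ((List.range cs.length).countP (pvCond cs k) : Int) := by
  induction cs generalizing k with
  | nil => simp [pvPenA]
  | cons c cs ih =>
    rw [List.length_cons, List.range_succ_eq_map, List.countP_cons, List.countP_map]
    have hcomp : (pvCond (c :: cs) k ∘ Nat.succ) = pvCond cs (if pvVowel c then 0 else k + 1) := by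
      funext i; exact pv_cond_succ cs c k i
    rw [hcomp]
    have h0 : pvCond (c :: cs) k 0 = (!pvVowel c && decide (5 < k + 1)) := by
      simp [pvCond]
    rw [h0]
    cases hv : pvVowel c
    · simp only [pvPenA, hv, Bool.false_eq_true, if_false, ih, Bool.not_false, Bool.true_and]
      by_cases hk : k + 1 > 5
      · simp [hk]; ring
      · simp [hk]
    · simp [pvPenA, hv, ih]

-- with no virtual consonants the condition is exactly B's window test
theorem pv_cond_zero (cs : List Char) (i : Nat) : pvCond cs 0 i = pvBad cs i := by
  by_cases h5 : 5 ≤ i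
  · have h6 : (i + 1) - (i - 5) = 6 := by omega
    simp [pvCond, pvBad, List.drop_take, h5, h6, Bool.and_comm]
  · simp [pvCond, pvBad, h5]

-- ===== VERDICT (by name: the statement is the Claim_ definition above) =====
theorem score_plaintext_spec : Claim_equal_score_plaintext := by
  intro text _
  unfold Spec_score_plaintext score_plaintext score_plaintext_alt
  simp only [pv_kw_foldl, pv_fold_penA, PySem.List.foldl_count_if]
  rw [pv_penA_count]
  have : (List.range text.toList.length).countP (pvCond text.toList 0)
       = (List.range text.toList.length).countP (pvBad text.toList) := by
    apply List.countP_congr; intro i _; rw [pv_cond_zero]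
  rw [this]
  simp
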